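-- pv_equiv track=rewrite | github.com/yolinab/Container_filling_final | run_container_packing.py | find_free_floor_segments
-- ===== SOURCE A (Python) =====
-- def find_free_floor_segments(boxes, L):
--     """
--     Return free floor segments along Y: list of (y_start, y_end),
--     based only on pallets with z == 0.
--     """
--     floor_boxes = [b for b in boxes if b["z"] == 0]
--     if not floor_boxes:
--         return [(0, L)]
--
--     min_y = min(b["y"] for b in floor_boxes)
--     max_y = max(b["y"] + b["l"] for b in floor_boxes)
--
--     segments = []
--     if min_y > 0:
--         segments.append((0, min_y))
--     if max_y < L:
--         segments.append((max_y, L))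
--
--     return segments
-- ===== SOURCE B (Python) =====
-- def _merge(p, q):
--     # combine optional bounding intervals
--     if p is None:
--         return q
--     if q is None:
--         return p
--     return (min(p[0], q[0]), max(p[1], q[1]))
--
--
-- def _floor_bounds(boxes):
--     # divide and conquer: bounding Y-interval of the floor (z == 0) boxes
--     if not boxes:
--         return None
--     if len(boxes) == 1:
--         b = boxes[0]
--         if b["z"] == 0:
--             return (b["y"], b["y"] + b["l"])
--         return None
--     mid = len(boxes) // 2
--     return _merge(_floor_bounds(boxes[:mid]), _floor_bounds(boxes[mid:]))
--
--
-- def find_free_floor_segments(boxes, L):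
--     bounds = _floor_bounds(boxes)
--     if bounds is None:
--         return [(0, L)]
--     min_y, max_y = bounds
--     segments = []
--     if min_y > 0:
--         segments.append((0, min_y))
--     if max_y < L:
--         segments.append((max_y, L))
--     return segments
-- ===== Notes on version B (the rewrite author's own statement) =====
-- stated objective: alternative
-- what changed: Replaces the filter + separate min()/max() scans with a divide-and-conquer recursion that halves the box list and merges optional bounding intervals with an explicit combiner, then assembles the end gaps from the combined bound.
import Mathlib
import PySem

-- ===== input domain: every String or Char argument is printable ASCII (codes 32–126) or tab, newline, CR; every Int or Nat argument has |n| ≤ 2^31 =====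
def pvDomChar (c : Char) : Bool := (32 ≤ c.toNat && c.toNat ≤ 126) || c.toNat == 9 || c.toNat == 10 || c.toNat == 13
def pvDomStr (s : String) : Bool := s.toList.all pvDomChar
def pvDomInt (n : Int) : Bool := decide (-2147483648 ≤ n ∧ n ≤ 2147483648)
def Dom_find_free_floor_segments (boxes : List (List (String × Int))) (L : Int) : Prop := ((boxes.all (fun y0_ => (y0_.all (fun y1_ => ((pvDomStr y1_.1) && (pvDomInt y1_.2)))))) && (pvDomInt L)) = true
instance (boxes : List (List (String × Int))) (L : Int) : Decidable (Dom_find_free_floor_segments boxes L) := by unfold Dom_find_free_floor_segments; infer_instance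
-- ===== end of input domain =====

-- B replaces A's filter + separate min()/max() scans with a divide-and-conquer recursion
-- that halves the list and merges optional bounding intervals (alternative decomposition, same O(n) work).


-- shared field access: b["k"] on the association-list dict (none = KeyError, excluded by Pre_)
def pvField (b : List (String × Int)) (k : String) : Option Int := (PySem.Dict.mk b).get? k

-- ===== PORT A =====
def find_free_floor_segments (boxes : List (List (String × Int))) (L : Int) : List (Int × Int) :=
  let floor_boxes := boxes.filter (fun b => pvField b "z" == some 0)
  if floor_boxes.isEmpty then [((0 : Int), L)]
  else
    let min_y := (PySem.List.min? (floor_boxes.map (fun b => (pvField b "y").getD 0)) (fun y => y)).getD 0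
    let max_y := (PySem.List.max? (floor_boxes.map (fun b => (pvField b "y").getD 0 + (pvField b "l").getD 0)) (fun y => y)).getD 0
    let segments : List (Int × Int) := []
    let segments := if min_y > 0 then segments ++ [((0 : Int), min_y)] else segments
    let segments := if max_y < L then segments ++ [(max_y, L)] else segments
    segments

-- ===== PORT B =====
-- _merge: combine optional bounding intervals
def pvMerge : Option (Int × Int) → Option (Int × Int) → Option (Int × Int)
  | none, q => q
  | some p, none => some p
  | some p, some q => some (min p.1 q.1, max p.2 q.2)

-- _floor_bounds: divide and conquer over the box list
def pvBounds : List (List (String × Int)) → Option (Int × Int)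
  | [] => none
  | [b] =>
      if pvField b "z" == some 0 then
        some ((pvField b "y").getD 0, (pvField b "y").getD 0 + (pvField b "l").getD 0)
      else none
  | a :: b :: t =>
      let mid := (a :: b :: t).length / 2
      pvMerge (pvBounds ((a :: b :: t).take mid)) (pvBounds ((a :: b :: t).drop mid))
termination_by l => l.length
decreasing_by all_goals (simp [List.length_take, List.length_drop, List.length_cons]; omega)

def find_free_floor_segments_alt (boxes : List (List (String × Int))) (L : Int) : List (Int × Int) :=
  match pvBounds boxes with
  | none => [((0 : Int), L)]
  | some (min_y, max_y) =>
      let segments : List (Int × Int) := []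
      let segments := if min_y > 0 then segments ++ [((0 : Int), min_y)] else segments
      let segments := if max_y < L then segments ++ [(max_y, L)] else segments
      segments

-- ===== PRECONDITION & SPEC =====
-- Pre_ excludes exactly the inputs where Python A raises KeyError: a box without a "z"
-- key, or a floor box (z == 0) without a "y" or "l" key.
def Pre_find_free_floor_segments (boxes : List (List (String × Int))) (L : Int) : Prop :=
  (boxes.all (fun b =>
    (PySem.Dict.mk b).contains "z" &&
      (!(pvField b "z" == some 0) ||
        ((PySem.Dict.mk b).contains "y" && (PySem.Dict.mk b).contains "l")))) = true
instance (boxes : List (List (String × Int))) (L : Int) : Decidable (Pre_find_free_floor_segments boxes L) := by unfold Pre_find_free_floor_segments; infer_instance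

def pvWitness_find_free_floor_segments : (List (List (String × Int))) × Int :=
  ([[("z", 0), ("y", 2), ("l", 3)], [("z", 1)]], 10)

def Spec_find_free_floor_segments (boxes : List (List (String × Int))) (L : Int) (out : List (Int × Int)) : Prop := out = find_free_floor_segments_alt boxes L
instance (boxes : List (List (String × Int))) (L : Int) (out : List (Int × Int)) : Decidable (Spec_find_free_floor_segments boxes L out) := by unfold Spec_find_free_floor_segments; infer_instance

-- ===== CLAIM (what is proved, stated in full; the proofs are below) =====
def Claim_equal_find_free_floor_segments : Prop := ∀ (boxes : List (List (String × Int))) (L : Int), Dom_find_free_floor_segments boxes L → Pre_find_free_floor_segments boxes L → Spec_find_free_floor_segments boxes L (find_free_floor_segments boxes L)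

-- ===== LEMMAS AND PROOFS =====

-- linear reference fold over the list, for relating both sides
def pvStep (st : Option (Int × Int)) (b : List (String × Int)) : Option (Int × Int) :=
  if pvField b "z" == some 0 then
    pvMerge st (some ((pvField b "y").getD 0, (pvField b "y").getD 0 + (pvField b "l").getD 0))
  else st

def pvLin (l : List (List (String × Int))) : Option (Int × Int) := l.foldl pvStep none

lemma pvMerge_none_left (q : Option (Int × Int)) : pvMerge none q = q := rfl

lemma pvMerge_none_right (p : Option (Int × Int)) : pvMerge p none = p := by
  cases p <;> rfl

lemma pvMerge_assoc (p q r : Option (Int × Int)) :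
    pvMerge (pvMerge p q) r = pvMerge p (pvMerge q r) := by
  cases p <;> cases q <;> cases r <;> simp [pvMerge, min_assoc, max_assoc]

lemma foldl_step_merge (l : List (List (String × Int))) (st : Option (Int × Int)) :
    l.foldl pvStep st = pvMerge st (pvLin l) := by
  induction l generalizing st with
  | nil => simp [pvLin, pvMerge_none_right]
  | cons b t ih =>
      simp only [pvLin, List.foldl_cons] at *
      rw [ih (pvStep st b), ih (pvStep none b)]
      unfold pvStep
      split_ifs with h
      · simp only [pvMerge_none_left, pvMerge_assoc]
      · simp only [pvMerge_none_left]

lemma pvLin_append (l1 l2 : List (List (String × Int))) :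
    pvLin (l1 ++ l2) = pvMerge (pvLin l1) (pvLin l2) := by
  simp only [pvLin, List.foldl_append]
  rw [foldl_step_merge]
  rfl

lemma pvBounds_eq_lin : ∀ (l : List (List (String × Int))), pvBounds l = pvLin l
  | [] => by simp [pvBounds, pvLin]
  | [b] => by
      by_cases h : (pvField b "z" == some 0) = true <;>
        simp [pvBounds, pvLin, pvStep, pvMerge, h]
  | a :: b :: t => by
      have h1 := pvBounds_eq_lin ((a :: b :: t).take ((a :: b :: t).length / 2))
      have h2 := pvBounds_eq_lin ((a :: b :: t).drop ((a :: b :: t).length / 2))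
      rw [pvBounds, h1, h2, ← pvLin_append, List.take_append_drop]
termination_by l => l.length
decreasing_by all_goals (simp [List.length_take, List.length_drop, List.length_cons]; omega)

lemma foldl_min_min (a b : Int) (l : List Int) :
    l.foldl min (min a b) = min a (l.foldl min b) := by
  induction l generalizing b with
  | nil => rfl
  | cons c t ih => simp only [List.foldl_cons, min_assoc, ih]

lemma foldl_max_max (a b : Int) (l : List Int) :
    l.foldl max (max a b) = max a (l.foldl max b) := by
  induction l generalizing b with
  | nil => rfl
  | cons c t ih => simp only [List.foldl_cons, max_assoc, ih]

-- the fold equals A's characterization over the filtered list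
lemma pvLin_filter (l : List (List (String × Int))) :
    pvLin l =
      match l.filter (fun b => pvField b "z" == some 0) with
      | [] => none
      | b :: rest =>
          some ((rest.map (fun b => (pvField b "y").getD 0)).foldl min ((pvField b "y").getD 0),
                (rest.map (fun b => (pvField b "y").getD 0 + (pvField b "l").getD 0)).foldl max
                  ((pvField b "y").getD 0 + (pvField b "l").getD 0)) := by
  induction l with
  | nil => rfl
  | cons b t ih =>
      have hcons : pvLin (b :: t) = pvMerge (pvStep none b) (pvLin t) := by
        simp only [pvLin, List.foldl_cons]
        rw [foldl_step_merge]
        rfl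
      by_cases h : (pvField b "z" == some 0) = true
      · rw [hcons, ih]
        simp only [pvStep, h, if_true, List.filter_cons, pvMerge]
        cases hf : t.filter (fun b => pvField b "z" == some 0) with
        | nil => simp
        | cons c rest =>
            simp [List.foldl_cons, foldl_min_min, foldl_max_max]
      · rw [hcons, ih]
        simp only [pvStep, h, List.filter_cons, pvMerge]
        simp

-- ===== VERDICT (by name: the statement is the Claim_ definition above) =====
theorem find_free_floor_segments_spec : Claim_equal_find_free_floor_segments := by
  intro boxes L _ _
  unfold Spec_find_free_floor_segments find_free_floor_segments find_free_floor_segments_alt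
  rw [pvBounds_eq_lin, pvLin_filter]
  cases hf : boxes.filter (fun b => pvField b "z" == some 0) with
  | nil => simp
  | cons b rest =>
      simp only [List.isEmpty_cons, if_false, Bool.false_eq_true]
      rw [List.map_cons, List.map_cons, PySem.List.min?_id_cons, PySem.List.max?_id_cons]
      rfl
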